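-- pv_equiv track=rewrite | github.com/HashFast/hashfast-tools | hf/protocol/op_usb_init.py | coremap_array
-- ===== SOURCE A (Python) =====
-- def coremap_array(die_bitmap, cores):
--   result = []
--   mask = 0x1
--   for i in range(cores):
--     if die_bitmap & mask > 0:
--       result = result + [1]
--     else:
--       result = result + [0]
--     mask = mask << 1
--   return result
-- ===== SOURCE B (Python) =====
-- def coremap_array(die_bitmap, cores):
--     # B: render the masked bitmap as a zero-padded binary string, then map
--     # its characters (least-significant first) to ints.
--     if cores <= 0:
--         return []
--     m = die_bitmap & ((1 << cores) - 1)
--     s = bin(m)[2:].zfill(cores)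
--     return [int(c) for c in reversed(s)]
-- ===== Notes on version B (the rewrite author's own statement) =====
-- stated objective: faster
-- what changed: Instead of walking a growing one-bit mask and rebuilding the result by list concatenation each step, B masks the bitmap once, renders it as a zero-padded binary string via bin()/zfill(), and maps the reversed string's characters to ints in one comprehension.
import Mathlib
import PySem

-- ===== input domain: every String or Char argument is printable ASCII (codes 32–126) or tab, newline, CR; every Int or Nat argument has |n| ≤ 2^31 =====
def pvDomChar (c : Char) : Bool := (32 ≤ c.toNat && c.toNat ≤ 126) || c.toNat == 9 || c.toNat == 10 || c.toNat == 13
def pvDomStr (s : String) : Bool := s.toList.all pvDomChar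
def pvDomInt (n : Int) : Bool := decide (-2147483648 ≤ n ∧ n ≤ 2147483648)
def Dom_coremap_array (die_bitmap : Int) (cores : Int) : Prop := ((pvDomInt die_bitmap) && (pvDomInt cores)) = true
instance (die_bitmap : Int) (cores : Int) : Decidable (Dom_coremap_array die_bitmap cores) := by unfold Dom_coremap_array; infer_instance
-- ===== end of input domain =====

-- B masks the bitmap once, renders it as a zero-padded binary string (bin/zfill) and maps
-- the reversed string's characters to ints, instead of A's growing one-bit mask with
-- quadratic list concatenation; return values are proved equal everywhere.

-- ===== PORT A =====
def coremap_array (die_bitmap : Int) (cores : Int) : List Int :=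
  ((PySem.List.pyRange 0 cores 1).foldl
    (fun (st : List Int × Int) _i =>
      (if PySem.Int.band die_bitmap st.2 > 0 then st.1 ++ [1] else st.1 ++ [0],
       st.2 <<< (1 : Nat)))
    ([], 1)).1

-- ===== PORT B =====
-- binary digits of a positive Nat, most-significant first (the digit part of Python's bin)
def pvBinAux : Nat → List Char
  | 0 => []
  | m+1 => pvBinAux ((m+1)/2) ++ [if (m+1) % 2 = 1 then '1' else '0']
decreasing_by exact Nat.div_lt_self (Nat.succ_pos m) (by norm_num)

def coremap_array_alt (die_bitmap : Int) (cores : Int) : List Int :=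
  if cores ≤ 0 then []
  else
    -- m = die_bitmap & ((1 << cores) - 1); cores > 0 here so the Nat shift is exact
    let m := PySem.Int.band die_bitmap ((1 : Int) <<< cores.toNat - 1)
    -- s = bin(m)[2:]: m ≥ 0 always holds here, so the Nat digit list is exact (bin(0)[2:] = "0")
    let s := if m.toNat = 0 then ['0'] else pvBinAux m.toNat
    -- .zfill(cores): pad with '0' on the left up to cores characters
    let padded := List.replicate (cores.toNat - s.length) '0' ++ s
    -- [int(c) for c in reversed(s)]: int of a single digit char is its code minus 48
    padded.reverse.map (fun c => ((c.toNat : Int) - 48))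

-- ===== PRECONDITION & SPEC =====
def Spec_coremap_array (die_bitmap : Int) (cores : Int) (out : List Int) : Prop := out = coremap_array_alt die_bitmap cores
instance (die_bitmap : Int) (cores : Int) (out : List Int) : Decidable (Spec_coremap_array die_bitmap cores out) := by unfold Spec_coremap_array; infer_instance

-- ===== CLAIM (what is proved, stated in full; the proofs are below) =====
def Claim_equal_coremap_array : Prop := ∀ (die_bitmap : Int) (cores : Int), Dom_coremap_array die_bitmap cores → Spec_coremap_array die_bitmap cores (coremap_array die_bitmap cores)

-- ===== LEMMAS AND PROOFS =====

-- Python's `n & 2^j` is positive exactly when bit j is set, i.e. when n / 2^j is odd.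
theorem pv_nat_bit (m j : Nat) : m &&& 2^j = if (m / 2^j) % 2 = 1 then 2^j else 0 := by
  rw [Nat.and_two_pow, Nat.testBit, Nat.shiftRight_eq_div_pow]
  rcases Nat.mod_two_eq_zero_or_one (m / 2^j) with h | h <;> simp [h]

-- Python's `b & (2^n - 1)` is `b mod 2^n` (Euclidean), for every Int b.
theorem pv_band_mask (b : Int) (n : Nat) : PySem.Int.band b ((2:Int)^n - 1) = b % 2^n := by
  have hone : (1:Nat) ≤ 2^n := Nat.one_le_two_pow
  have hcast : ((2:Int)^n - 1) = ((2^n - 1 : Nat) : Int) := by push_cast [hone]; ring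
  have h1i : (1:Int) ≤ 2^n := by exact_mod_cast hone
  rcases b with m | m
  · show PySem.Int.band ((m:Nat) : Int) _ = _
    rw [hcast, PySem.Int.band_natCast, Nat.and_two_pow_sub_one_eq_mod, Int.natCast_emod]
    push_cast; rfl
  · unfold PySem.Int.band
    have h2 : ¬ (0 : Int) ≤ Int.negSucc m := by omega
    rw [if_neg h2, if_pos (by omega : (0:Int) ≤ 2^n - 1)]
    have hneg : (-(Int.negSucc m) - 1).toNat = m := by rw [Int.negSucc_eq]; omega
    rw [hneg, hcast]
    have htn : ((2^n - 1 : Nat) : Int).toNat = 2^n - 1 := by omega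
    rw [htn, Nat.and_comm, Nat.and_two_pow_sub_one_eq_mod]
    have hmlt : m % 2^n < 2^n := Nat.mod_lt _ (by omega)
    have hns : Int.negSucc m = -(m:Int) - 1 := by rw [Int.negSucc_eq]; ring
    rw [hns]
    have e2 : ((2^n : Nat) : Int) = 2^n := by push_cast; rfl
    have e1 : ((2^n - 1 - m % 2^n : Nat) : Int) = (2:Int)^n - 1 - ((m % 2^n : Nat):Int) := by
      rw [Nat.cast_sub (Nat.le_sub_one_of_lt hmlt), Nat.cast_sub hone, Nat.cast_one, e2]
    have hm : (2:Int)^n * ((m / 2^n : Nat) : Int) + ((m % 2^n : Nat) : Int) = (m : Int) := by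
      rw [← e2, ← Nat.cast_mul, ← Nat.cast_add, Nat.div_add_mod]
    have hrw : -(m:Int) - 1 = ((2^n - 1 - m % 2^n : Nat) : Int) + 2^n * (-((m / 2^n : Nat):Int) - 1) := by
      rw [e1]; linear_combination hm
    rw [hrw, Int.add_mul_emod_self_left,
        Int.emod_eq_of_lt (by positivity) (by rw [e1]; have hr : (0:Int) ≤ ((m % 2^n : Nat):Int) := Int.natCast_nonneg _; omega)]

-- A's branch test against the one-bit mask 2^j computes bit j of b, i.e. b / 2^j % 2.
theorem pv_band_bit (b : Int) (j : Nat) :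
    (if 0 < PySem.Int.band b ((2:Int)^j) then (1:Int) else 0) = (b / 2^j) % 2 := by
  have h2j : (0:Int) < 2^j := by positivity
  have hc : ((2:Int)^j) = ((2^j : Nat) : Int) := by push_cast; rfl
  rcases b with m | m
  · show (if 0 < PySem.Int.band ((m:Nat):Int) _ then (1:Int) else 0) = ((m:Nat):Int) / 2^j % 2
    rw [hc, PySem.Int.band_natCast, pv_nat_bit, ← Int.natCast_ediv]
    rcases Nat.mod_two_eq_zero_or_one (m / 2^j) with h | h <;> simp [h] <;>
      rw [hc, ← Int.natCast_ediv] <;> omega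
  · unfold PySem.Int.band
    have h2 : ¬ (0 : Int) ≤ Int.negSucc m := by omega
    rw [if_neg h2, if_pos (le_of_lt h2j)]
    have hneg : (-(Int.negSucc m) - 1).toNat = m := by rw [Int.negSucc_eq]; omega
    have htn : ((2:Int)^j).toNat = 2^j := by rw [hc]; omega
    rw [hneg, htn, Nat.and_comm, pv_nat_bit]
    have hns : Int.negSucc m = -(m:Int) - 1 := by rw [Int.negSucc_eq]; ring
    have hmlt : m % 2^j < 2^j := Nat.mod_lt _ (by positivity)
    have e2 : ((2^j : Nat) : Int) = 2^j := by push_cast; rfl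
    have e1 : ((2^j - 1 - m % 2^j : Nat) : Int) = (2:Int)^j - 1 - ((m % 2^j : Nat):Int) := by
      rw [Nat.cast_sub (Nat.le_sub_one_of_lt hmlt), Nat.cast_sub Nat.one_le_two_pow, Nat.cast_one, e2]
    have hm : (2:Int)^j * ((m / 2^j : Nat) : Int) + ((m % 2^j : Nat) : Int) = (m : Int) := by
      rw [← e2, ← Nat.cast_mul, ← Nat.cast_add, Nat.div_add_mod]
    have hdm : Int.negSucc m / 2^j = -((m / 2^j : Nat) : Int) - 1 := by
      rw [hns, show -(m:Int) - 1 = ((2^j - 1 - m % 2^j : Nat) : Int) + 2^j * (-((m / 2^j : Nat):Int) - 1) by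
            rw [e1]; linear_combination hm,
          Int.add_mul_ediv_left _ _ (by omega : (2:Int)^j ≠ 0),
          Int.ediv_eq_zero_of_lt (by positivity) (by rw [e1]; have hr : (0:Int) ≤ ((m % 2^j : Nat):Int) := Int.natCast_nonneg _; omega)]
      ring
    rw [hdm]
    rcases Nat.mod_two_eq_zero_or_one (m / 2^j) with h | h <;> simp [h] <;>
      rw [hc, ← Int.natCast_ediv] <;> omega

-- A's fold with mask 2^k appends exactly the digits b / 2^(k+i) % 2.
theorem pv_foldA (b : Int) (l : List Int) : ∀ (res : List Int) (k : Nat),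
    (l.foldl
      (fun (st : List Int × Int) _i =>
        (if PySem.Int.band b st.2 > 0 then st.1 ++ [1] else st.1 ++ [0],
         st.2 <<< (1 : Nat)))
      (res, 2^k))
    = (res ++ (List.range l.length).map (fun i => b / 2^(k+i) % 2), 2^(k + l.length)) := by
  induction l with
  | nil => intro res k; simp
  | cons x t ih =>
    intro res k
    have hsh : ((2:Int)^k) <<< (1:Nat) = 2^(k+1) := by
      rw [Int.shiftLeft_eq]; ring
    have hbit : (if PySem.Int.band b (2^k) > 0 then res ++ [1] else res ++ [0])
        = res ++ [b / 2^k % 2] := by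
      rcases em (0 < PySem.Int.band b ((2:Int)^k)) with h | h
      · rw [if_pos h, ← pv_band_bit b k, if_pos h]
      · rw [if_neg h, ← pv_band_bit b k, if_neg h]
    simp only [List.foldl_cons, hsh, hbit]
    rw [ih (res ++ [b / 2^k % 2]) (k+1)]
    have hmap : (List.range t.length).map (fun i => b / 2^(k+1+i) % 2)
        = (List.range t.length).map ((fun i => b / 2^(k+i) % 2) ∘ Nat.succ) :=
      List.map_congr_left (fun i _ => by
        simp only [Function.comp_apply, Nat.succ_eq_add_one]
        rw [show k+1+i = k+(i+1) from by omega])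
    rw [Prod.mk.injEq]
    refine ⟨?_, ?_⟩
    · rw [hmap, List.length_cons, List.range_succ_eq_map, List.map_cons, List.map_map,
          List.append_assoc, List.singleton_append, Nat.add_zero]
    · rw [List.length_cons, show k + 1 + t.length = k + (t.length + 1) from by omega]

-- Reading a low digit through the mask changes nothing: (b % 2^n) / 2^i % 2 = b / 2^i % 2 for i < n.
theorem pv_digit_of_emod (b : Int) (n i : Nat) (h : i < n) :
    (b % 2^n) / 2^i % 2 = b / 2^i % 2 := by
  have hsplit : b % 2^n = b + 2^i * (-(2^(n-i) * (b / 2^n))) := by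
    rw [Int.emod_def]
    have : (2:Int)^n = 2^i * 2^(n-i) := by rw [← pow_add]; congr 1; omega
    rw [this]; ring
  rw [hsplit, Int.add_mul_ediv_left _ _ (by positivity : (0:Int) < 2^i).ne']
  have hev : -((2:Int)^(n-i) * (b / 2^n)) = 2 * (-(2^(n-i-1) * (b / 2^n))) := by
    have : (2:Int)^(n-i) = 2 * 2^(n-i-1) := by
      rw [← pow_succ']; congr 1; omega
    rw [this]; ring
  rw [hev, Int.add_mul_emod_self_left]

-- m is below 2 to its own bit length.
theorem pv_bin_lt (m : Nat) : m < 2 ^ (pvBinAux m).length := by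
  induction m using Nat.strong_induction_on with
  | _ m ih =>
    match m with
    | 0 => simp [pvBinAux]
    | k+1 =>
      rw [pvBinAux]
      have h := ih ((k+1)/2) (Nat.div_lt_self (Nat.succ_pos k) (by norm_num))
      simp only [List.length_append, List.length_singleton, pow_succ]
      omega

-- the bit length of m is at most n whenever m < 2^n.
theorem pv_bin_len_le (m n : Nat) (h : m < 2^n) : (pvBinAux m).length ≤ n := by
  induction m using Nat.strong_induction_on generalizing n with
  | _ m ih =>
    match m with
    | 0 => simp [pvBinAux]
    | k+1 =>
      have hn : 1 ≤ n := by
        by_contra hc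
        interval_cases n <;> omega
      rw [pvBinAux]
      have hlt : (k+1)/2 < 2^(n-1) := by
        have : (2:Nat)^n = 2^(n-1) * 2 := by
          rw [← pow_succ]; congr 1; omega
        omega
      have := ih ((k+1)/2) (Nat.div_lt_self (Nat.succ_pos k) (by norm_num)) (n-1) hlt
      simp only [List.length_append, List.length_singleton]
      omega

-- reversing the MSB-first digit string and reading the digits gives m / 2^i % 2, LSB first.
theorem pv_bin_rev (m : Nat) :
    (pvBinAux m).reverse.map (fun c => ((c.toNat : Int) - 48))
      = (List.range (pvBinAux m).length).map (fun i => ((m / 2^i % 2 : Nat) : Int)) := by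
  induction m using Nat.strong_induction_on with
  | _ m ih =>
    match m with
    | 0 => simp [pvBinAux]
    | k+1 =>
      rw [pvBinAux]
      have h := ih ((k+1)/2) (Nat.div_lt_self (Nat.succ_pos k) (by norm_num))
      rw [List.reverse_append, List.reverse_singleton, List.singleton_append, List.map_cons, h]
      have hd : ((if (k+1) % 2 = 1 then '1' else '0').toNat : Int) - 48
          = (((k+1) / 2^0 % 2 : Nat) : Int) := by
        rcases Nat.mod_two_eq_zero_or_one (k+1) with h2 | h2 <;>
          simp [h2, Char.toNat]
      rw [hd]
      have hmap : (List.range (pvBinAux ((k+1)/2)).length).map (fun i => (((k+1)/2 / 2^i % 2 : Nat) : Int))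
          = (List.range (pvBinAux ((k+1)/2)).length).map
              ((fun i => (((k+1) / 2^i % 2 : Nat) : Int)) ∘ Nat.succ) :=
        List.map_congr_left (fun i _ => by
          simp only [Function.comp_apply, Nat.succ_eq_add_one]
          rw [Nat.div_div_eq_div_mul, ← pow_succ'])
      rw [hmap, List.length_append, List.length_singleton,
          List.range_succ_eq_map, List.map_cons, List.map_map, pow_zero, Nat.div_one]

-- the zero-padded reversed binary string of M reads off the digits M / 2^i % 2 for i < n.
theorem pv_main (M n : Nat) (h1 : M < 2^n) (h2 : 1 ≤ n) :
    ((List.replicate (n - (if M = 0 then ['0'] else pvBinAux M).length) '0'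
        ++ (if M = 0 then ['0'] else pvBinAux M)).reverse.map (fun c => ((c.toNat : Int) - 48)))
      = (List.range n).map (fun i => ((M / 2^i % 2 : Nat) : Int)) := by
  rcases Nat.eq_zero_or_pos M with hM0 | hMpos
  · subst hM0
    rw [if_pos rfl, List.length_singleton,
        show List.replicate (n - 1) '0' ++ ['0'] = List.replicate n '0' by
          rw [← List.replicate_succ']; congr 1; omega,
        List.reverse_replicate, List.map_replicate]
    symm
    apply List.eq_replicate_iff.mpr
    refine ⟨by simp, ?_⟩
    intro x hx
    rw [List.mem_map] at hx
    obtain ⟨i, _, hxe⟩ := hx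
    simp [← hxe, Char.toNat]
  · have hMne : ¬ M = 0 := by omega
    rw [if_neg hMne]
    set L := (pvBinAux M).length with hL
    have hLle : L ≤ n := pv_bin_len_le M n h1
    have hMltL : M < 2^L := pv_bin_lt M
    rw [List.reverse_append, List.map_append, pv_bin_rev, List.reverse_replicate,
        List.map_replicate]
    have hr : List.range n = List.range L ++ (List.range (n - L)).map (fun x => L + x) := by
      conv_lhs => rw [show n = L + (n - L) from by omega]
      rw [List.range_add]
    rw [hr, List.map_append, List.map_map]
    congr 1
    symm
    apply List.eq_replicate_iff.mpr
    refine ⟨by simp, ?_⟩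
    intro x hx
    rw [List.mem_map] at hx
    obtain ⟨i, _, hxe⟩ := hx
    have hz : M / 2^(L + i) = 0 :=
      Nat.div_eq_of_lt (lt_of_lt_of_le hMltL (Nat.pow_le_pow_right (by norm_num) (by omega)))
    rw [← hxe]
    simp only [Function.comp_apply, hz]
    decide

-- ===== VERDICT (by name: the statement is the Claim_ definition above) =====
theorem coremap_array_spec : Claim_equal_coremap_array := by
  intro b cores _
  show coremap_array b cores = coremap_array_alt b cores
  rcases le_or_gt cores 0 with hle | hgt
  · unfold coremap_array coremap_array_alt
    rw [PySem.List.pyRange_one_eq_nil hle, if_pos hle]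
    rfl
  · unfold coremap_array coremap_array_alt
    rw [if_neg (by omega)]
    set n := cores.toNat with hn
    have hA := pv_foldA b (PySem.List.pyRange 0 cores 1) [] 0
    rw [show (2:Int)^(0:Nat) = 1 from rfl] at hA
    rw [hA]
    simp only [List.nil_append, PySem.List.length_pyRange_one]
    have hn0 : (cores - 0).toNat = n := by omega
    rw [hn0]
    have hsh1 : (1 : Int) <<< n - 1 = 2^n - 1 := by rw [Int.shiftLeft_eq]; ring
    rw [hsh1, pv_band_mask]
    have hMnn : (0:Int) ≤ b % 2^n := Int.emod_nonneg b (by positivity)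
    set M := (b % 2^n).toNat with hM
    have hlt' : b % 2^n < ((2^n : Nat) : Int) := by
      push_cast
      exact Int.emod_lt_of_pos b (by positivity)
    have hMlt : M < 2^n := by omega
    have hdig : ∀ i ∈ List.range n, b / 2^(0 + i) % 2 = ((M / 2^i % 2 : Nat) : Int) := by
      intro i hi
      rw [List.mem_range] at hi
      rw [Nat.zero_add, ← pv_digit_of_emod b n i hi,
          show b % 2^n = ((M : Nat) : Int) from (Int.toNat_of_nonneg hMnn).symm]
      push_cast
      rfl
    rw [List.map_congr_left hdig, ← pv_main M n hMlt (by omega)]
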